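-- pv_equiv track=rewrite | github.com/NVIDIA/NeMo | bignlp/train_scripts/train_utils.py | convert_args_to_hydra_train_args
-- ===== SOURCE A (Python) =====
-- def convert_args_to_hydra_train_args(args, prefix="training."):
--     for index, arg in enumerate(args):
--         k, v = arg.split("=", 1)
--         if "splits_string" in k and "\\" not in v:
--             args[index] = "{}={}".format(k, v.replace("'", "\\'"))
--
--     train_args = [x.replace(prefix, "") for x in args if x.startswith(prefix)]
--     train_args = [x.replace("None", "null") for x in train_args if "run." not in x]
--     hydra_train_args = " ".join(train_args)
--     return hydra_train_args
-- ===== SOURCE B (Python) =====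
-- def convert_args_to_hydra_train_args(args, prefix="training."):
--     # Build the result string back-to-front in one reversed pass: no intermediate
--     # lists and no join; `out is None` means "no piece emitted yet".
--     out = None
--     for i in range(len(args) - 1, -1, -1):
--         k, v = args[i].split("=", 1)
--         if "splits_string" in k and "\\" not in v:
--             args[i] = k + "=" + v.replace("'", "\\'")
--         arg = args[i]
--         if arg.startswith(prefix):
--             piece = arg.replace(prefix, "")
--             if "run." not in piece:
--                 piece = piece.replace("None", "null")
--                 out = piece if out is None else piece + " " + out
--     return out if out is not None else ""
-- ===== Notes on version B (the rewrite author's own statement) =====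
-- stated objective: alternative
-- what changed: Builds the result string directly back-to-front in one reversed index pass with an Optional accumulator (piece + ' ' + rest), instead of A's three forward passes producing intermediate lists joined at the end; the same in-place mutation of args is kept.
import Mathlib
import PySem

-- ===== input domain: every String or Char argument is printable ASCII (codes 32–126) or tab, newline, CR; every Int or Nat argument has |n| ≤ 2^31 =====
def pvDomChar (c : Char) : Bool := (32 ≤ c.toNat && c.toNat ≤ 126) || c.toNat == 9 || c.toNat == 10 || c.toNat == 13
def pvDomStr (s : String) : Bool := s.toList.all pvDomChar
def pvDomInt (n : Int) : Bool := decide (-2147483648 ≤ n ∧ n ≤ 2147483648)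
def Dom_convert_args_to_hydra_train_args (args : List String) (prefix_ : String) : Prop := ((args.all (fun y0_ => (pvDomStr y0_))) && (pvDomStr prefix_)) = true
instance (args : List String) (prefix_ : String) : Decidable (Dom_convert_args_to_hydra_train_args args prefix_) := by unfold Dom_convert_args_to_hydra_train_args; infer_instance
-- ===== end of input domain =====

-- B builds the result string back-to-front in one reversed pass (Optional accumulator)
-- instead of A's three forward passes + join; return-value equivalence only is proved
-- here (both Pythons also mutate args in place, with the same final list state).

-- ===== PORT A =====
-- the body of A's first loop: k, v = arg.split("=", 1); quote-escape splits_string values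
-- (the `_ => arg` branch is unreachable under Pre_: Python raises ValueError there)
def pvEscape (arg : String) : String :=
  match PySem.Str.splitMax? arg "=" 1 with
  | some [k, v] =>
      if PySem.Str.isIn "splits_string" k && !(PySem.Str.isIn "\\" v) then
        k ++ "=" ++ PySem.Str.replace v "'" "\\'"
      else arg
  | _ => arg

def convert_args_to_hydra_train_args (args : List String) (prefix_ : String) : String :=
  let args1 := args.map pvEscape
  let train_args1 := (args1.filter (fun x => PySem.Str.startswith x prefix_)).map
      (fun x => PySem.Str.replace x prefix_ "")
  let train_args2 := (train_args1.filter (fun x => !(PySem.Str.isIn "run." x))).map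
      (fun x => PySem.Str.replace x "None" "null")
  PySem.Str.join " " train_args2

-- ===== PORT B =====
-- B's reversed index loop, as structural recursion processing the tail (= the already
-- visited higher indices) first; `none` = "no piece emitted yet".
-- (the `_ => out` branch of the unpack is unreachable under Pre_: Python raises there)
def pvEmitRev (prefix_ : String) : List String → Option String
  | [] => none
  | a :: rest =>
    let out := pvEmitRev prefix_ rest
    let arg :=
      match PySem.Str.splitMax? a "=" 1 with
      | some [k, v] =>
          if PySem.Str.isIn "splits_string" k && !(PySem.Str.isIn "\\" v) then
            k ++ "=" ++ PySem.Str.replace v "'" "\\'"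
          else a
      | _ => a
    if PySem.Str.startswith arg prefix_ then
      let piece := PySem.Str.replace arg prefix_ ""
      if !(PySem.Str.isIn "run." piece) then
        let piece := PySem.Str.replace piece "None" "null"
        some (match out with | none => piece | some s => piece ++ " " ++ s)
      else out
    else out

def convert_args_to_hydra_train_args_alt (args : List String) (prefix_ : String) : String :=
  match pvEmitRev prefix_ args with
  | some s => s
  | none => ""

-- ===== PRECONDITION & SPEC =====
-- Pre_ excludes exactly the inputs where Python A raises: an arg without '=' makes
-- `k, v = arg.split("=", 1)` fail with ValueError.
def Pre_convert_args_to_hydra_train_args (args : List String) (prefix_ : String) : Prop :=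
  ∀ a ∈ args, PySem.Str.isIn "=" a = true
instance (args : List String) (prefix_ : String) : Decidable (Pre_convert_args_to_hydra_train_args args prefix_) := by unfold Pre_convert_args_to_hydra_train_args; infer_instance

def pvWitness_convert_args_to_hydra_train_args : List String × String :=
  (["training.gpus=8", "name=x", "training.run.id=None"], "training.")

def Spec_convert_args_to_hydra_train_args (args : List String) (prefix_ : String) (out : String) : Prop := out = convert_args_to_hydra_train_args_alt args prefix_
instance (args : List String) (prefix_ : String) (out : String) : Decidable (Spec_convert_args_to_hydra_train_args args prefix_ out) := by unfold Spec_convert_args_to_hydra_train_args; infer_instance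

-- ===== CLAIM (what is proved, stated in full; the proofs are below) =====
def Claim_equal_convert_args_to_hydra_train_args : Prop := ∀ (args : List String) (prefix_ : String), Dom_convert_args_to_hydra_train_args args prefix_ → Pre_convert_args_to_hydra_train_args args prefix_ → Spec_convert_args_to_hydra_train_args args prefix_ (convert_args_to_hydra_train_args args prefix_)

-- ===== LEMMAS AND PROOFS =====

-- the list of pieces A joins (proof-side abbreviation of A's three passes)
def pvPieces (prefix_ : String) (args : List String) : List String :=
  ((((args.map pvEscape).filter (fun x => PySem.Str.startswith x prefix_)).map
      (fun x => PySem.Str.replace x prefix_ "")).filter (fun x => !(PySem.Str.isIn "run." x))).map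
      (fun x => PySem.Str.replace x "None" "null")

theorem pvPieces_cons (prefix_ : String) (a : String) (rest : List String) :
    pvPieces prefix_ (a :: rest) =
      (if PySem.Str.startswith (pvEscape a) prefix_ then
        (if !(PySem.Str.isIn "run." (PySem.Str.replace (pvEscape a) prefix_ "")) then
          [PySem.Str.replace (PySem.Str.replace (pvEscape a) prefix_ "") "None" "null"]
        else []) else []) ++ pvPieces prefix_ rest := by
  unfold pvPieces
  split_ifs with h1 h2
  · simp at h1 h2
    simp [h1, h2]
  · simp at h1 h2
    simp [h1, h2]
  · simp at h1
    simp [h1]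

-- " ".join over a cons with a nonempty tail, on Strings
theorem pvJoin_cons (p q : String) (l : List String) :
    PySem.Str.join " " (p :: q :: l) = p ++ " " ++ PySem.Str.join " " (q :: l) := by
  apply String.ext
  simp [PySem.Str.join, PySem.Chars.join_cons_cons]

-- B's back-to-front builder produces exactly A's pieces, joined
theorem pvEmitRev_eq (prefix_ : String) (args : List String) :
    pvEmitRev prefix_ args =
      match pvPieces prefix_ args with
      | [] => none
      | l => some (PySem.Str.join " " l) := by
  induction args with
  | nil => simp [pvEmitRev, pvPieces]
  | cons a rest ih =>
      rw [show pvEmitRev prefix_ (a :: rest) =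
        (let out := pvEmitRev prefix_ rest
         let arg := pvEscape a
         if PySem.Str.startswith arg prefix_ then
           let piece := PySem.Str.replace arg prefix_ ""
           if !(PySem.Str.isIn "run." piece) then
             let piece := PySem.Str.replace piece "None" "null"
             some (match out with | none => piece | some s => piece ++ " " ++ s)
           else out
         else out) from rfl]
      rw [pvPieces_cons, ih]
      by_cases h1 : PySem.Str.startswith (pvEscape a) prefix_ = true
      · by_cases h2 : (!PySem.Str.isIn "run." (PySem.Str.replace (pvEscape a) prefix_ "")) = true
        · simp only [if_pos h1, if_pos h2]
          cases hp : pvPieces prefix_ rest with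
          | nil =>
              simp only [List.append_nil]
              apply congrArg
              apply String.ext
              simp [PySem.Str.join, PySem.Chars.join_singleton]
          | cons q l =>
              simp only [List.singleton_append]
              rw [pvJoin_cons]
        · simp only [if_neg h2, if_pos h1, List.nil_append]
      · simp only [if_neg h1, List.nil_append]

-- ===== VERDICT (by name: the statement is the Claim_ definition above) =====
theorem convert_args_to_hydra_train_args_spec : Claim_equal_convert_args_to_hydra_train_args := by
  intro args prefix_ _ _
  unfold Spec_convert_args_to_hydra_train_args
  unfold convert_args_to_hydra_train_args convert_args_to_hydra_train_args_alt
  rw [pvEmitRev_eq]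
  show PySem.Str.join " " (pvPieces prefix_ args) = _
  cases hp : pvPieces prefix_ args with
  | nil =>
      apply String.ext
      simp [PySem.Str.join, PySem.Chars.join_nil]
  | cons q l => rfl
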